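-- pv_equiv track=rewrite | github.com/ratiuraul/advent_of_code_2024 | day22/solution2.py | get_prices
-- ===== SOURCE A (Python) =====
-- def mix(num: int, secret_num: int) -> int:
--     return num ^ secret_num
--
-- def prune(secret_num: int) -> int:
--     return secret_num % 16777216
--
-- def get_prices(secret_num, no_generate):
--     prices = [secret_num % 10]
--     for _ in range(no_generate):
--         res = secret_num * 64
--         secret_num = mix(res, secret_num)
--         secret_num = prune(secret_num)
--         div_sn = secret_num // 32
--         secret_num = mix(div_sn, secret_num)
--         secret_num = prune(secret_num)
--         mul_sn = secret_num * 2048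
--         secret_num = mix(mul_sn, secret_num)
--         secret_num = prune(secret_num)
--         prices.append(secret_num % 10)
--     return prices
-- ===== SOURCE B (Python) =====
-- def next_secret(s):
--     s = (s ^ (s * 64)) % 16777216
--     s = (s ^ (s // 32)) % 16777216
--     s = (s ^ (s * 2048)) % 16777216
--     return s
--
-- def _chain(s, n):
--     # secrets s_0 .. s_n, built by divide and conquer on n
--     if n <= 0:
--         return [s]
--     if n == 1:
--         return [s, next_secret(s)]
--     h = n // 2
--     left = _chain(s, h)
--     right = _chain(left[-1], n - h)
--     return left + right[1:]
--
-- def get_prices(secret_num, no_generate):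
--     return [s % 10 for s in _chain(secret_num, no_generate)]
-- ===== Notes on version B (the rewrite author's own statement) =====
-- stated objective: alternative
-- what changed: B builds the chain of secret numbers by divide and conquer (split the count in half, recurse on each half, join on the shared middle secret) and then maps %10 over the chain in a separate pass, instead of A's single linear loop that interleaves the mix/prune updates with price collection.
import Mathlib
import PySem

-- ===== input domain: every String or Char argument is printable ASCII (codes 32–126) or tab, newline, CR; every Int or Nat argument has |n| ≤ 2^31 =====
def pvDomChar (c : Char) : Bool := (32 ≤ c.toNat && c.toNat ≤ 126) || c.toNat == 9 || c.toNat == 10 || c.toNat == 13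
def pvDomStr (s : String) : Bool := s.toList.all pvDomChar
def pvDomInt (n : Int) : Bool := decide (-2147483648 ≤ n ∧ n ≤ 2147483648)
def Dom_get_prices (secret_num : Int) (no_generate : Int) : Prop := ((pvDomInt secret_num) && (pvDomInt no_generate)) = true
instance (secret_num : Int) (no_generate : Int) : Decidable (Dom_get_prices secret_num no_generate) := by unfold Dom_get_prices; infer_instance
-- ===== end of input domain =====

-- B replaces A's single interleaved loop by a divide-and-conquer construction of the secret chain (split n in half, recurse, join) followed by a %10 mapping pass; equal return values proved on all inputs.

-- ===== PORT A =====
def mix (num : Int) (secret_num : Int) : Int := PySem.Int.bxor num secret_num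

def prune (secret_num : Int) : Int := PySem.Int.mod secret_num 16777216

def get_prices (secret_num : Int) (no_generate : Int) : List Int :=
  let st := (PySem.List.pyRange 0 no_generate 1).foldl
    (fun (st : Int × List Int) _ =>
      let s := st.1
      let res := s * 64
      let s := prune (mix res s)
      let div_sn := PySem.Int.floordiv s 32
      let s := prune (mix div_sn s)
      let mul_sn := s * 2048
      let s := prune (mix mul_sn s)
      (s, st.2 ++ [PySem.Int.mod s 10]))
    (secret_num, [PySem.Int.mod secret_num 10])
  st.2

-- ===== PORT B =====
def next_secret (s : Int) : Int :=
  let s1 := PySem.Int.mod (PySem.Int.bxor s (s * 64)) 16777216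
  let s2 := PySem.Int.mod (PySem.Int.bxor s1 (PySem.Int.floordiv s1 32)) 16777216
  PySem.Int.mod (PySem.Int.bxor s2 (s2 * 2048)) 16777216

-- _chain: secrets s_0 .. s_n by divide and conquer on n.
-- left[-1] is ported as pyGet? ... (-1) with default 0: left is nonempty, so the IndexError branch is unreachable.
def pyChain (s : Int) (n : Int) : List Int :=
  if _h0 : n ≤ 0 then [s]
  else if _h1 : n = 1 then [s, next_secret s]
  else
    let h := PySem.Int.floordiv n 2
    let left := pyChain s h
    let right := pyChain ((PySem.List.pyGet? left (-1)).getD 0) (n - h)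
    left ++ PySem.List.slice right (some 1) none
termination_by n.toNat
decreasing_by
  all_goals
    simp only [PySem.Int.floordiv_eq_ediv_of_pos (by norm_num : (0:Int) < 2)]
    omega

def get_prices_alt (secret_num : Int) (no_generate : Int) : List Int :=
  (pyChain secret_num no_generate).map (fun s => PySem.Int.mod s 10)

-- ===== PRECONDITION & SPEC =====
def Spec_get_prices (secret_num : Int) (no_generate : Int) (out : List Int) : Prop := out = get_prices_alt secret_num no_generate
instance (secret_num : Int) (no_generate : Int) (out : List Int) : Decidable (Spec_get_prices secret_num no_generate out) := by unfold Spec_get_prices; infer_instance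

-- ===== CLAIM (what is proved, stated in full; the proofs are below) =====
def Claim_equal_get_prices : Prop := ∀ (secret_num : Int) (no_generate : Int), Dom_get_prices secret_num no_generate → Spec_get_prices secret_num no_generate (get_prices secret_num no_generate)

-- ===== LEMMAS AND PROOFS =====

-- tail of the secret chain after s, of length k
def tsecs (s : Int) : Nat → List Int
  | 0 => []
  | k + 1 => next_secret s :: tsecs (next_secret s) k

-- full secret chain s_0 .. s_k
def secs (s : Int) (k : Nat) : List Int := s :: tsecs s k

theorem secs_succ (s : Int) (k : Nat) : secs s (k + 1) = s :: secs (next_secret s) k := by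
  simp [secs, tsecs]

-- A's in-loop secret update equals B's next_secret (xor arguments commute)
theorem stepA_secret_eq (s : Int) :
    prune (mix ((prune (mix (PySem.Int.floordiv (prune (mix (s * 64) s)) 32) (prune (mix (s * 64) s)))) * 2048)
      (prune (mix (PySem.Int.floordiv (prune (mix (s * 64) s)) 32) (prune (mix (s * 64) s)))))
    = next_secret s := by
  simp [mix, prune, next_secret, PySem.Int.bxor_comm]

-- A's loop body, named (identical to the lambda in get_prices)
def stepA : Int × List Int → Int → Int × List Int := fun st _ =>
  let s := st.1
  let res := s * 64
  let s := prune (mix res s)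
  let div_sn := PySem.Int.floordiv s 32
  let s := prune (mix div_sn s)
  let mul_sn := s * 2048
  let s := prune (mix mul_sn s)
  (s, st.2 ++ [PySem.Int.mod s 10])

theorem get_prices_as_stepA (secret_num no_generate : Int) :
    get_prices secret_num no_generate
      = ((PySem.List.pyRange 0 no_generate 1).foldl stepA
          (secret_num, [PySem.Int.mod secret_num 10])).2 := rfl

theorem stepA_apply (s : Int) (acc : List Int) (x : Int) :
    stepA (s, acc) x = (next_secret s, acc ++ [PySem.Int.mod (next_secret s) 10]) := by
  simp only [stepA, stepA_secret_eq]

-- loop invariant for A's fold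
theorem foldA_eq (l : List Int) (s : Int) (acc : List Int) :
    l.foldl stepA (s, acc)
    = (next_secret^[l.length] s, acc ++ (tsecs s l.length).map (fun x => PySem.Int.mod x 10)) := by
  induction l generalizing s acc with
  | nil => simp [tsecs]
  | cons a t ih =>
      rw [List.foldl_cons, stepA_apply, ih (next_secret s) (acc ++ [PySem.Int.mod (next_secret s) 10])]
      simp [tsecs, Function.iterate_succ_apply, List.append_assoc]

theorem secs_getLast? (k : Nat) : ∀ s : Int, (secs s k).getLast? = some (next_secret^[k] s) := by
  induction k with
  | zero => intro s; simp [secs, tsecs]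
  | succ k ih =>
      intro s
      rw [secs_succ,
        show secs (next_secret s) k = next_secret s :: tsecs (next_secret s) k from rfl,
        List.getLast?_cons_cons,
        show next_secret s :: tsecs (next_secret s) k = secs (next_secret s) k from rfl,
        ih (next_secret s), Function.iterate_succ_apply]

theorem secs_add (a : Nat) : ∀ (s : Int) (b : Nat), secs s (a + b) = secs s a ++ tsecs (next_secret^[a] s) b := by
  induction a with
  | zero => intro s b; simp [secs, tsecs]
  | succ a ih =>
      intro s b
      have : a + 1 + b = (a + b) + 1 := by omega
      rw [this, secs_succ, ih (next_secret s) b, secs_succ]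
      simp [Function.iterate_succ_apply]

theorem pyChain_eq (k : Nat) : ∀ (s : Int) (n : Int), n.toNat = k → pyChain s n = secs s k := by
  induction k using Nat.strong_induction_on with
  | _ k ih =>
    intro s n hk
    rw [pyChain]
    by_cases h0 : n ≤ 0
    · rw [dif_pos h0]
      have : k = 0 := by omega
      subst this; simp [secs, tsecs]
    · rw [dif_neg h0]
      by_cases h1 : n = 1
      · rw [dif_pos h1]
        have : k = 1 := by omega
        subst this; simp [secs, tsecs]
      · rw [dif_neg h1]
        have hfd : PySem.Int.floordiv n 2 = n / 2 := PySem.Int.floordiv_eq_ediv_of_pos (by norm_num)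
        have h2 : (2:Int) ≤ n := by omega
        have hlt1 : (PySem.Int.floordiv n 2).toNat < k := by rw [hfd]; omega
        have hlt2 : (n - PySem.Int.floordiv n 2).toNat < k := by rw [hfd]; omega
        have hsum : (PySem.Int.floordiv n 2).toNat + (n - PySem.Int.floordiv n 2).toNat = k := by
          rw [hfd]; omega
        show pyChain s (PySem.Int.floordiv n 2) ++
            PySem.List.slice (pyChain ((PySem.List.pyGet? (pyChain s (PySem.Int.floordiv n 2)) (-1)).getD 0)
              (n - PySem.Int.floordiv n 2)) (some 1) none = secs s k
        rw [ih _ hlt1 s _ rfl, PySem.List.pyGet?_neg_one, secs_getLast?]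
        simp only [Option.getD_some]
        rw [ih _ hlt2 _ _ rfl,
          show (1:Int) = ((1:Nat):Int) from rfl, PySem.List.slice_from_natCast,
          show (secs (next_secret^[(PySem.Int.floordiv n 2).toNat] s) ((n - PySem.Int.floordiv n 2).toNat)).drop 1
            = tsecs (next_secret^[(PySem.Int.floordiv n 2).toNat] s) ((n - PySem.Int.floordiv n 2).toNat) from rfl,
          ← secs_add, hsum]

-- ===== VERDICT (by name: the statement is the Claim_ definition above) =====
theorem get_prices_spec : Claim_equal_get_prices := by
  intro secret_num no_generate _
  unfold Spec_get_prices get_prices_alt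
  rw [pyChain_eq no_generate.toNat secret_num no_generate rfl, get_prices_as_stepA,
    foldA_eq (PySem.List.pyRange 0 no_generate 1) secret_num [PySem.Int.mod secret_num 10]]
  simp [secs, PySem.List.length_pyRange_one]
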